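-- pv_equiv track=rewrite | github.com/Thunno/Thunno2 | src/build/lib/thunno2/helpers.py | perfect_nth
-- ===== SOURCE A (Python) =====
-- def inclusive_zero_range(n):
--     if n >= 0:
--         return list(range(int(n) + 1))
--     return [-i for i in range(abs(int(n)) + 1)]
--
-- def perfect_nth(n, a):
--     if isinstance(a, float):
--         if not str(a).endswith(".0"):
--             return 0
--         a = int(a)
--     n = int(n)
--     if n <= 0:
--         return 0
--     if n == 1:
--         return 1
--     l = [i**n for i in inclusive_zero_range(abs(a))]
--     return int(a in l)
-- ===== SOURCE B (Python) =====
-- def perfect_nth(n, a):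
--     if isinstance(a, float):
--         if not str(a).endswith(".0"):
--             return 0
--         a = int(a)
--     n = int(n)
--     if n <= 0:
--         return 0
--     if n == 1:
--         return 1
--     if a < 0:
--         return 0
--     # binary-search the integer n-th root of a, then check it exactly
--     lo, hi = 0, a
--     while lo < hi:
--         mid = (lo + hi + 1) // 2
--         if mid ** n <= a:
--             lo = mid
--         else:
--             hi = mid - 1
--     return int(lo ** n == a)
-- ===== Notes on version B (the rewrite author's own statement) =====
-- stated objective: faster
-- what changed: Replace the enumeration of all n-th powers of 0..|a| (a list of |a|+1 big-integer powers, then a linear membership scan) by a binary search for the integer n-th root of a followed by one exact power check; negative a (whose powers never occur in A's nonnegative list) returns 0 directly.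
import Mathlib
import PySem

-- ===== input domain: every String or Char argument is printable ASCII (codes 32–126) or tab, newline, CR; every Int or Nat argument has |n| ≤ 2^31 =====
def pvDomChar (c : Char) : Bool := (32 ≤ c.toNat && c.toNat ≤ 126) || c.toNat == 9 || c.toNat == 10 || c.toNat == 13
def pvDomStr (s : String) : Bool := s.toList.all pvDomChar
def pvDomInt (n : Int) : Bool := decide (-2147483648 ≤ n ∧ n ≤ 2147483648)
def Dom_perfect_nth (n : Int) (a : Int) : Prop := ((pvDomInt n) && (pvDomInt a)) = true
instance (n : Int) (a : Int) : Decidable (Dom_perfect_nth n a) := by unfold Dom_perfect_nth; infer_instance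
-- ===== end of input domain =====

-- B replaces A's enumeration of all n-th powers of 0..|a| by a binary search for the
-- integer n-th root followed by one exact power check (objective: faster).
-- (Python A's float branch is dead on Int inputs and is omitted from both ports.)

-- ===== PORT A =====
def inclusive_zero_range (n : Int) : List Int :=
  if n ≥ 0 then PySem.List.pyRange 0 (n + 1) 1
  else (PySem.List.pyRange 0 (|n| + 1) 1).map (fun i => -i)

def perfect_nth (n : Int) (a : Int) : Int :=
  if n ≤ 0 then 0
  else if n = 1 then 1
  else
    let l := (inclusive_zero_range |a|).map (fun i => i ^ n.toNat)
    if a ∈ l then 1 else 0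

-- ===== PORT B =====
-- the while-loop of Source B, as recursion on the shrinking interval [lo, hi]
def nthRootSearch (k : Nat) (a lo hi : Int) : Int :=
  if h : lo < hi then
    if (PySem.Int.floordiv (lo + hi + 1) 2) ^ k ≤ a then
      nthRootSearch k a (PySem.Int.floordiv (lo + hi + 1) 2) hi
    else
      nthRootSearch k a lo (PySem.Int.floordiv (lo + hi + 1) 2 - 1)
  else lo
termination_by (hi - lo).toNat
decreasing_by
  · have := PySem.Int.floordiv_eq_ediv_of_pos (a := lo + hi + 1) (b := 2) (by omega)
    simp only [this]; omega
  · have := PySem.Int.floordiv_eq_ediv_of_pos (a := lo + hi + 1) (b := 2) (by omega)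
    simp only [this]; omega

def perfect_nth_alt (n : Int) (a : Int) : Int :=
  if n ≤ 0 then 0
  else if n = 1 then 1
  else if a < 0 then 0
  else
    let lo := nthRootSearch n.toNat a 0 a
    if lo ^ n.toNat = a then 1 else 0

-- ===== PRECONDITION & SPEC =====
def Spec_perfect_nth (n : Int) (a : Int) (out : Int) : Prop := out = perfect_nth_alt n a
instance (n : Int) (a : Int) (out : Int) : Decidable (Spec_perfect_nth n a out) := by unfold Spec_perfect_nth; infer_instance

-- ===== CLAIM (what is proved, stated in full; the proofs are below) =====
def Claim_equal_perfect_nth : Prop := ∀ (n : Int) (a : Int), Dom_perfect_nth n a → Spec_perfect_nth n a (perfect_nth n a)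

-- ===== LEMMAS AND PROOFS =====

-- the binary search returns the greatest r in [lo, hi] with r^k ≤ a, given the invariant at entry
lemma nthRootSearch_spec (k : Nat) (a : Int) :
    ∀ (N : Nat) (lo hi : Int), (hi - lo).toNat ≤ N → 0 ≤ lo → lo ≤ hi →
      lo ^ k ≤ a → (∀ j : Int, hi < j → a < j ^ k) →
      lo ≤ nthRootSearch k a lo hi ∧ nthRootSearch k a lo hi ≤ hi ∧
        (nthRootSearch k a lo hi) ^ k ≤ a ∧
        (∀ j : Int, nthRootSearch k a lo hi < j → a < j ^ k) := by
  intro N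
  induction N with
  | zero =>
    intro lo hi hN hlo hlh h1 h2
    have heq : lo = hi := by omega
    rw [nthRootSearch]
    simp only [show ¬ lo < hi by omega, dif_neg, not_false_iff]
    exact ⟨le_refl _, hlh, h1, by subst heq; exact h2⟩
  | succ N ih =>
    intro lo hi hN hlo hlh h1 h2
    rw [nthRootSearch]
    by_cases h : lo < hi
    · simp only [h, dif_pos]
      have hmid : PySem.Int.floordiv (lo + hi + 1) 2 = (lo + hi + 1) / 2 :=
        PySem.Int.floordiv_eq_ediv_of_pos (by omega)
      rw [hmid]
      set mid := (lo + hi + 1) / 2 with hm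
      have hb1 : lo < mid := by omega
      have hb2 : mid ≤ hi := by omega
      by_cases hp : mid ^ k ≤ a
      · simp only [hp, if_pos]
        exact (ih mid hi (by omega) (by omega) hb2 hp h2).imp
          (fun h' => le_trans (le_of_lt hb1) h') id
      · simp only [hp, if_neg, not_false_iff]
        have h2' : ∀ j : Int, mid - 1 < j → a < j ^ k := by
          intro j hj
          by_cases hjh : hi < j
          · exact h2 j hjh
          · have hmj : mid ≤ j := by omega
            calc a < mid ^ k := by omega
              _ ≤ j ^ k := pow_le_pow_left₀ (by omega) hmj k
        have := ih lo (mid - 1) (by omega) hlo (by omega) h1 h2'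
        exact ⟨this.1, le_trans this.2.1 (by omega), this.2.2⟩
    · simp only [h, dif_neg, not_false_iff]
      exact ⟨le_refl _, hlh, h1, fun j hj => h2 j (by omega)⟩

-- A's membership test, characterised as existence of an n-th root in [0, a]
lemma memA_iff (k : Nat) (a : Int) (ha : 0 ≤ a) :
    a ∈ (inclusive_zero_range |a|).map (fun i => i ^ k) ↔
      ∃ i : Int, 0 ≤ i ∧ i ≤ a ∧ i ^ k = a := by
  unfold inclusive_zero_range
  rw [if_pos (abs_nonneg a)]
  simp only [List.mem_map, PySem.List.mem_pyRange_one, abs_of_nonneg ha]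
  constructor
  · rintro ⟨i, ⟨hi0, hi1⟩, hik⟩; exact ⟨i, hi0, by omega, hik⟩
  · rintro ⟨i, hi0, hi1, hik⟩; exact ⟨i, ⟨hi0, by omega⟩, hik⟩

lemma memA_neg (k : Nat) (a : Int) (ha : a < 0) :
    a ∉ (inclusive_zero_range |a|).map (fun i => i ^ k) := by
  unfold inclusive_zero_range
  rw [if_pos (abs_nonneg a)]
  simp only [List.mem_map, PySem.List.mem_pyRange_one]
  rintro ⟨i, ⟨hi0, _⟩, hik⟩
  exact absurd hik (by nlinarith [pow_nonneg hi0 k])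

theorem perfect_nth_spec : Claim_equal_perfect_nth := by
  intro n a _
  unfold Spec_perfect_nth perfect_nth perfect_nth_alt
  by_cases h0 : n ≤ 0
  · simp [h0]
  · rw [if_neg h0, if_neg h0]
    by_cases h1 : n = 1
    · simp [h1]
    · rw [if_neg h1, if_neg h1]
      by_cases hneg : a < 0
      · rw [if_pos hneg, if_neg (memA_neg n.toNat a hneg)]
      · rw [if_neg hneg]
        rw [not_lt] at hneg
        have hk : n.toNat ≠ 0 := by omega
        obtain ⟨hr0, hra, hrk, hrmax⟩ :=
          nthRootSearch_spec n.toNat a (a - 0).toNat 0 a (le_refl _) (le_refl _) hneg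
            (by rw [zero_pow hk]; exact hneg)
            (by
              intro j hj
              calc a < j := hj
                _ ≤ j ^ n.toNat := le_self_pow₀ (by omega) hk)
        set r := nthRootSearch n.toNat a 0 a with hr
        by_cases hc : r ^ n.toNat = a
        · rw [if_pos hc, if_pos ((memA_iff n.toNat a hneg).mpr ⟨r, hr0, hra, hc⟩)]
        · rw [if_neg hc, if_neg ?_]
          intro hmem
          obtain ⟨i, hi0, hia, hik⟩ := (memA_iff n.toNat a hneg).mp hmem
          have hile : i ≤ r := by
            by_contra hlt
            exact absurd hik (by have := hrmax i (by omega); omega)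
          have : i ^ n.toNat ≤ r ^ n.toNat := pow_le_pow_left₀ hi0 hile n.toNat
          exact hc (by omega)
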